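-- pv_equiv track=rewrite | github.com/mrlovelies/better-software-of-you | modules/learning/kerry_brief.py | get_module_changes
-- ===== SOURCE A (Python) =====
-- def get_module_changes(changed_files: list[str]) -> dict[str, list[str]]:
--     """Group changed files by module."""
--     modules = {}
--     for f in changed_files:
--         if f.startswith("modules/"):
--             parts = f.split("/")
--             if len(parts) >= 2:
--                 mod_name = parts[1]
--                 modules.setdefault(mod_name, []).append(f)
--         elif f.startswith("skills/"):
--             parts = f.split("/")
--             if len(parts) >= 2:
--                 skill_name = parts[1]
--                 modules.setdefault(f"skill:{skill_name}", []).append(f)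
--     return modules
-- ===== SOURCE B (Python) =====
-- def get_module_changes(changed_files: list[str]) -> dict[str, list[str]]:
--     """Group changed files by module."""
--     def group_key(f):
--         parts = f.split("/")
--         if len(parts) < 2:
--             return None
--         if parts[0] == "modules":
--             return parts[1]
--         if parts[0] == "skills":
--             return "skill:" + parts[1]
--         return None
--
--     keys = [group_key(f) for f in changed_files]
--     order = [k for k in dict.fromkeys(keys) if k is not None]
--     return {k: [f for f, kk in zip(changed_files, keys) if kk == k] for k in order}
-- ===== Notes on version B (the rewrite author's own statement) =====
-- stated objective: alternative
-- what changed: A threads one mutable dict through a single loop with setdefault/append; B instead computes a group key per file once, dedups the non-None keys in first-occurrence order with dict.fromkeys, and builds each group by a comprehension that filters the precomputed (file, key) pairs.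
import Mathlib
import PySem

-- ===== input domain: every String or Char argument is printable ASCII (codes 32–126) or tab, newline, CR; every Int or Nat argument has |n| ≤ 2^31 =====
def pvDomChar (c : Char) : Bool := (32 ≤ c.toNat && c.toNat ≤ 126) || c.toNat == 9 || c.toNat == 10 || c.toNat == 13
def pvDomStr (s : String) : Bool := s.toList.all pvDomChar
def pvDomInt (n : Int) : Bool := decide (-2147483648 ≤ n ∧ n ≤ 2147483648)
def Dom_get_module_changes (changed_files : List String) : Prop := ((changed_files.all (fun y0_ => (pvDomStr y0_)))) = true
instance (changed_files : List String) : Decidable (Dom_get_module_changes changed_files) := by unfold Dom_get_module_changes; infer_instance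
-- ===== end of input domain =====

-- B replaces A's single pass over a mutable setdefault-dict by: a group-key function applied once per
-- file, an ordered dedup of the non-None keys, and one filter of the precomputed (file, key) pairs per
-- group (objective: alternative decomposition, same return value).

-- ===== PORT A =====
-- exact: the separator "/" is nonempty, so Python's f.split("/") never raises and split? is always `some`
def pvSplitSlash (f : String) : List String := (PySem.Str.split? f "/").getD []

-- the body of A's for-loop; modules.setdefault(name, []).append(f) is Dict.modify name [] (· ++ [f])
def pvStepA (modules : PySem.Dict String (List String)) (f : String) : PySem.Dict String (List String) :=
  if PySem.Str.startswith f "modules/" then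
    let parts := pvSplitSlash f
    if 2 ≤ parts.length then
      PySem.Dict.modify modules (PySem.List.pyGetD parts 1 "") [] (fun v => v ++ [f])
    else modules
  else if PySem.Str.startswith f "skills/" then
    let parts := pvSplitSlash f
    if 2 ≤ parts.length then
      PySem.Dict.modify modules ("skill:" ++ PySem.List.pyGetD parts 1 "") [] (fun v => v ++ [f])
    else modules
  else modules

def get_module_changes (changed_files : List String) : List (String × List String) :=
  (changed_files.foldl pvStepA PySem.Dict.empty).items

-- ===== PORT B =====
def pvGroupKey (f : String) : Option String :=
  let parts := pvSplitSlash f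
  if parts.length < 2 then none
  else if PySem.List.pyGetD parts 0 "" == "modules" then some (PySem.List.pyGetD parts 1 "")
  else if PySem.List.pyGetD parts 0 "" == "skills" then some ("skill:" ++ PySem.List.pyGetD parts 1 "")
  else none

def get_module_changes_alt (changed_files : List String) : List (String × List String) :=
  let keys := changed_files.map pvGroupKey
  let order := (PySem.List.dedup keys).filterMap id
  order.map (fun k => (k, ((changed_files.zip keys).filter (fun p => p.2 == some k)).map (fun p => p.1)))

-- ===== PRECONDITION & SPEC =====
def Spec_get_module_changes (changed_files : List String) (out : List (String × List String)) : Prop := out = get_module_changes_alt changed_files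
instance (changed_files : List String) (out : List (String × List String)) : Decidable (Spec_get_module_changes changed_files out) := by unfold Spec_get_module_changes; infer_instance

-- ===== CLAIM (what is proved, stated in full; the proofs are below) =====
def Claim_equal_get_module_changes : Prop := ∀ (changed_files : List String), Dom_get_module_changes changed_files → Spec_get_module_changes changed_files (get_module_changes changed_files)

-- ===== LEMMAS AND PROOFS =====

-- simple structural recursion equal to PySem.Chars.splitOn · ['/']
def pvSplit : List Char → List (List Char)
  | [] => [[]]
  | c :: r => if c = '/' then [] :: pvSplit r else (pvSplit r).modifyHead (c :: ·)

theorem pvSplit_ne_nil (l : List Char) : pvSplit l ≠ [] := by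
  cases l with
  | nil => simp [pvSplit]
  | cons c r =>
    simp only [pvSplit]
    split
    · simp
    · have := pvSplit_ne_nil r
      cases h : pvSplit r with
      | nil => exact absurd h this
      | cons a t => simp

theorem pvGo_char : ∀ (fuel : Nat) (l : List Char), l.length ≤ fuel → ∀ (cur : List Char) (acc : List (List Char)),
    PySem.Chars.splitOn.go ['/'] (fuel + 1) l cur acc = acc.reverse ++ (pvSplit l).modifyHead (cur.reverse ++ ·) := by
  intro fuel
  induction fuel with
  | zero =>
    intro l hl cur acc
    rw [Nat.le_zero, List.length_eq_zero_iff] at hl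
    subst hl
    rw [PySem.Chars.splitOn.go.eq_def]
    simp [pvSplit]
  | succ n ih =>
    intro l hl cur acc
    cases l with
    | nil =>
      rw [PySem.Chars.splitOn.go.eq_def]
      simp [pvSplit]
    | cons c rest =>
      rw [PySem.Chars.splitOn.go.eq_def]
      simp only [List.length_cons] at hl
      by_cases hc : c = '/'
      · subst hc
        have hpre : List.isPrefixOf ['/'] ('/' :: rest) = true := by simp [List.isPrefixOf]
        simp only [hpre, if_pos]
        rw [show (n + 1) = (n + 1) by rfl]
        have hdrop : List.drop (List.length ['/']) ('/' :: rest) = rest := by simp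
        rw [hdrop]
        rw [ih rest (by omega) [] (cur.reverse :: acc)]
        cases h : pvSplit rest with
        | nil => exact absurd h (pvSplit_ne_nil rest)
        | cons a t => simp [pvSplit, h]
      · have hpre : List.isPrefixOf ['/'] (c :: rest) = false := by
          simp [List.isPrefixOf]
          exact fun h => absurd h.symm hc
        simp only [hpre]
        simp only [Bool.false_eq_true, if_false]
        rw [ih rest (by omega) (c :: cur) acc]
        simp only [pvSplit, if_neg hc]
        rw [List.modifyHead_modifyHead]
        congr 1
        cases h : pvSplit rest with
        | nil => exact absurd h (pvSplit_ne_nil rest)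
        | cons a t => simp [Function.comp]

theorem pvSplitOn_slash (l : List Char) : PySem.Chars.splitOn l ['/'] = pvSplit l := by
  show PySem.Chars.splitOn.go ['/'] (l.length + 1) l [] [] = _
  rw [pvGo_char l.length l le_rfl [] []]
  cases h : pvSplit l with
  | nil => exact absurd h (pvSplit_ne_nil l)
  | cons a t => simp

theorem pvStartswith_iff (w : List Char) (hw : '/' ∉ w) (l : List Char) :
    PySem.Chars.startswith l (w ++ ['/']) = true ↔ 2 ≤ (pvSplit l).length ∧ (pvSplit l).headI = w := by
  induction l generalizing w with
  | nil =>
    simp only [PySem.Chars.startswith, List.isPrefixOf_iff_prefix, List.prefix_nil, pvSplit]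
    simp
  | cons c r ih =>
    by_cases hc : c = '/'
    · subst hc
      have hlen : 0 < (pvSplit r).length := List.length_pos_of_ne_nil (pvSplit_ne_nil r)
      cases w with
      | nil =>
        simp only [PySem.Chars.startswith, List.isPrefixOf_iff_prefix, List.nil_append,
          List.cons_prefix_cons, pvSplit, if_pos rfl, List.length_cons, List.headI]
        simp
        omega
      | cons w0 w' =>
        have hw0 : w0 ≠ '/' := fun h => hw (h ▸ List.mem_cons_self)
        simp only [PySem.Chars.startswith, List.isPrefixOf_iff_prefix, List.cons_append,
          List.cons_prefix_cons, pvSplit, if_pos rfl, List.headI]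
        simp
        intro h
        exact absurd h hw0
    · cases hr : pvSplit r with
      | nil => exact absurd hr (pvSplit_ne_nil r)
      | cons a t =>
        cases w with
        | nil =>
          simp only [PySem.Chars.startswith, List.isPrefixOf_iff_prefix, List.nil_append,
            List.cons_prefix_cons, pvSplit, if_neg hc, hr, List.modifyHead_cons, List.headI]
          simp
          intro h; exact absurd h.symm hc
        | cons w0 w' =>
          have hw' : '/' ∉ w' := fun h => hw (List.mem_cons_of_mem _ h)
          have ihr := ih w' hw'
          rw [hr] at ihr
          simp only [PySem.Chars.startswith, List.isPrefixOf_iff_prefix] at ihr ⊢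
          simp only [List.cons_append, List.cons_prefix_cons, pvSplit, if_neg hc, hr,
            List.modifyHead_cons, List.headI, List.length_cons] at *
          rw [ihr]
          simp only [List.length_cons, List.cons.injEq]
          constructor
          · rintro ⟨h1, h2, h3⟩; exact ⟨h2, ⟨h1.symm, h3⟩⟩
          · rintro ⟨h1, h2, h3⟩; exact ⟨h2.symm, h1, h3⟩

theorem pvSplitSlash_eq (f : String) : pvSplitSlash f = (pvSplit f.toList).map (fun c => String.ofList c) := by
  unfold pvSplitSlash PySem.Str.split?
  rw [show "/".toList = ['/'] by decide]
  simp [PySem.Chars.split?, pvSplitOn_slash]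

theorem pvStepA_eq (d : PySem.Dict String (List String)) (f : String) :
    pvStepA d f = match pvGroupKey f with
      | none => d
      | some k => PySem.Dict.modify d k [] (fun v => v ++ [f]) := by
  have hM := pvStartswith_iff ("modules".toList) (by decide) f.toList
  have hS := pvStartswith_iff ("skills".toList) (by decide) f.toList
  have eM : PySem.Str.startswith f "modules/" = PySem.Chars.startswith f.toList ("modules".toList ++ ['/']) := by
    rw [show ("modules".toList ++ ['/']) = "modules/".toList by decide]; rfl
  have eS : PySem.Str.startswith f "skills/" = PySem.Chars.startswith f.toList ("skills".toList ++ ['/']) := by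
    rw [show ("skills".toList ++ ['/']) = "skills/".toList by decide]; rfl
  simp only [pvStepA, pvGroupKey, pvSplitSlash_eq]
  cases hsp : pvSplit f.toList with
  | nil => exact absurd hsp (pvSplit_ne_nil f.toList)
  | cons a t =>
    rw [hsp] at hM hS
    cases t with
    | nil =>
      have hbM : PySem.Str.startswith f "modules/" = false := by
        rw [eM]; rw [Bool.eq_false_iff]; intro hb
        have := (hM.mp hb).1; simp at this
      have hbS : PySem.Str.startswith f "skills/" = false := by
        rw [eS]; rw [Bool.eq_false_iff]; intro hb
        have := (hS.mp hb).1; simp at this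
      simp [hbM, hbS]
    | cons b t' =>
      by_cases ha : a = "modules".toList
      · have hbM : PySem.Str.startswith f "modules/" = true := by
          rw [eM]; exact hM.mpr ⟨by simp, by simp [ha]⟩
        simp only [hbM, if_pos, List.map_cons, List.length_cons, if_true]
        have h2 : 2 ≤ t'.length + 1 + 1 := by omega
        have h0 : PySem.List.pyGetD (String.ofList a :: String.ofList b :: t'.map (fun c => String.ofList c)) 0 "" = String.ofList a := by
          rw [PySem.List.pyGetD_ofNat']; simp
        have haa : String.ofList a = "modules" := by rw [ha]; simp
        simp [h2, h0, haa]
      · have hbM : PySem.Str.startswith f "modules/" = false := by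
          rw [eM]; rw [Bool.eq_false_iff]; intro hb
          exact ha (by simpa using (hM.mp hb).2)
        by_cases hs : a = "skills".toList
        · have hbS : PySem.Str.startswith f "skills/" = true := by
            rw [eS]; exact hS.mpr ⟨by simp, by simp [hs]⟩
          simp only [hbM, hbS, Bool.false_eq_true, if_false, if_pos, List.map_cons, List.length_cons, if_true]
          have h2 : 2 ≤ t'.length + 1 + 1 := by omega
          have h0 : PySem.List.pyGetD (String.ofList a :: String.ofList b :: t'.map (fun c => String.ofList c)) 0 "" = String.ofList a := by
            rw [PySem.List.pyGetD_ofNat']; simp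
          have haa : String.ofList a = "skills" := by rw [hs]; simp
          have hnm : (String.ofList a == "modules") = false := by
            rw [haa]; decide
          simp [h2, h0, haa, hnm]
        · have hbS : PySem.Str.startswith f "skills/" = false := by
            rw [eS]; rw [Bool.eq_false_iff]; intro hb
            exact hs (by simpa using (hS.mp hb).2)
          have h0 : PySem.List.pyGetD (String.ofList a :: String.ofList b :: t'.map (fun c => String.ofList c)) 0 "" = String.ofList a := by
            rw [PySem.List.pyGetD_ofNat']; simp
          have hnm : (String.ofList a == "modules") = false := by
            rw [beq_eq_false_iff_ne]; intro hh
            exact ha (by rw [← hh]; simp)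
          have hns : (String.ofList a == "skills") = false := by
            rw [beq_eq_false_iff_ne]; intro hh
            exact hs (by rw [← hh]; simp)
          have hbM' : PySem.Chars.startswith f.toList ['m','o','d','u','l','e','s','/'] = false := by
            rw [show (['m','o','d','u','l','e','s','/'] : List Char) = "modules".toList ++ ['/'] by decide]
            rw [← eM]; exact hbM
          have hbS' : PySem.Chars.startswith f.toList ['s','k','i','l','l','s','/'] = false := by
            rw [show (['s','k','i','l','l','s','/'] : List Char) = "skills".toList ++ ['/'] by decide]
            rw [← eS]; exact hbS
          simp [hbM, hbS, hbM', hbS', h0, hnm, hns]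

def pvPairs (l : List String) : List (String × String) :=
  l.filterMap (fun f => (pvGroupKey f).map (fun k => (k, f)))

theorem pvFoldA (l : List String) : ∀ (d : PySem.Dict String (List String)),
    l.foldl pvStepA d = (pvPairs l).foldl (fun d p => PySem.Dict.modify d p.1 [] (fun v => v ++ [p.2])) d := by
  induction l with
  | nil => intro d; rfl
  | cons f l ih =>
    intro d
    simp only [List.foldl_cons, pvStepA_eq]
    cases hk : pvGroupKey f with
    | none => simp only [pvPairs, List.filterMap_cons, hk]; exact ih d
    | some k =>
      simp only [pvPairs, List.filterMap_cons, hk, Option.map_some, List.foldl_cons]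
      exact ih _

theorem pvItems_eq_keys_map (d : PySem.Dict String (List String)) (h : d.keys.Nodup) :
    d.items = d.keys.map (fun k => (k, d.getD k [])) := by
  have hkeys : d.keys = d.items.map (fun p => p.1) := by simp only [PySem.Dict.keys]
  rw [hkeys, List.map_map]
  have hcg : ∀ p ∈ d.items, ((fun k => (k, d.getD k [])) ∘ (fun p => p.1)) p = id p := by
    intro p hp
    have hg := PySem.Dict.getD_of_mem_items d (k := p.1) (v := p.2) (by simpa using hp) h []
    simp [hg]
  rw [List.map_congr_left hcg, List.map_id]

theorem pvFilterMap_id_foldl_add (xs : List (Option String)) : ∀ (s : List (Option String)),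
    (xs.foldl PySem.Set.add s).filterMap id = (xs.filterMap id).foldl PySem.Set.add (s.filterMap id) := by
  induction xs with
  | nil => intro s; rfl
  | cons x xs ih =>
    intro s
    rw [List.foldl_cons, ih]
    cases x with
    | none =>
      have h1 : List.filterMap id (PySem.Set.add s none) = List.filterMap id s := by
        by_cases h : none ∈ s <;>
          simp [PySem.Set.add, PySem.Set.contains, h, List.filterMap_append]
      have h2 : List.filterMap id (none :: xs) = List.filterMap id xs := by simp
      rw [h1, h2]
    | some a =>
      have hmem : (some a ∈ s) ↔ (a ∈ List.filterMap id s) := by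
        constructor
        · intro h; exact List.mem_filterMap.mpr ⟨some a, h, rfl⟩
        · intro h
          rcases List.mem_filterMap.mp h with ⟨o, ho, hoe⟩
          cases o with
          | none => simp at hoe
          | some b => simp at hoe; exact hoe ▸ ho
      have h2 : List.filterMap id (some a :: xs) = a :: List.filterMap id xs := by simp
      rw [h2, List.foldl_cons]
      have h1 : List.filterMap id (PySem.Set.add s (some a)) = PySem.Set.add (List.filterMap id s) a := by
        by_cases h : some a ∈ s
        · have h' : a ∈ List.filterMap id s := hmem.mp h
          simp [PySem.Set.add, PySem.Set.contains, h, h']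
        · have h' : a ∉ List.filterMap id s := fun hh => h (hmem.mpr hh)
          simp [PySem.Set.add, PySem.Set.contains, h, h', List.filterMap_append]
      rw [h1]

theorem pvPairs_map_fst (l : List String) : (pvPairs l).map (fun p => p.1) = l.filterMap pvGroupKey := by
  induction l with
  | nil => rfl
  | cons f l ih =>
    cases hk : pvGroupKey f with
    | none => simp [pvPairs, List.filterMap_cons, hk] at ih ⊢; exact ih
    | some k => simp [pvPairs, List.filterMap_cons, hk] at ih ⊢; exact ih

theorem pvGroup_eq (l : List String) (k : String) :
    ((l.zip (l.map pvGroupKey)).filter (fun p => p.2 == some k)).map (fun p => p.1)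
      = ((pvPairs l).filter (fun p => p.1 == k)).map (fun p => p.2) := by
  induction l with
  | nil => rfl
  | cons f l ih =>
    cases hk : pvGroupKey f with
    | none =>
      simp only [List.map_cons, List.zip_cons_cons, pvPairs, List.filterMap_cons, hk,
        List.filter_cons] at ih ⊢
      simpa using ih
    | some k' =>
      by_cases hkk : k' = k
      · subst hkk
        simp only [List.map_cons, List.zip_cons_cons, pvPairs, List.filterMap_cons, hk,
          Option.map_some, List.filter_cons] at ih ⊢
        simp [ih]
      · simp only [List.map_cons, List.zip_cons_cons, pvPairs, List.filterMap_cons, hk,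
          Option.map_some, List.filter_cons] at ih ⊢
        have h1 : (some k' == some k) = false := by simp [hkk]
        have h2 : (k' == k) = false := by simp [hkk]
        simp [h1, h2, ih]

-- ===== VERDICT (by name: the statement is the Claim_ definition above) =====
theorem get_module_changes_spec : Claim_equal_get_module_changes := by
  intro changed_files _
  unfold Spec_get_module_changes
  simp only [get_module_changes, get_module_changes_alt]
  rw [pvFoldA]
  rw [pvItems_eq_keys_map _ (by
    exact PySem.Dict.nodup_keys_foldl_modify_key (pvPairs changed_files) (fun p => p.1) []
      (fun _ p => fun v => v ++ [p.2]) PySem.Dict.empty PySem.Dict.nodup_keys_empty)]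
  rw [PySem.Dict.keys_foldl_modify_key (pvPairs changed_files) (fun p => p.1) []
      (fun _ p => fun v => v ++ [p.2]) PySem.Dict.empty]
  have horder : (PySem.List.dedup (changed_files.map pvGroupKey)).filterMap id
      = PySem.Set.update (PySem.Dict.empty : PySem.Dict String (List String)).keys ((pvPairs changed_files).map (fun p => p.1)) := by
    rw [PySem.List.dedup_eq_ofList, pvPairs_map_fst]
    show (List.foldl PySem.Set.add [] (changed_files.map pvGroupKey)).filterMap id = _
    rw [pvFilterMap_id_foldl_add]
    simp [PySem.Set.update, PySem.Dict.keys_empty, List.filterMap_map, Function.comp]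
  rw [← horder]
  apply List.map_congr_left
  intro k _
  rw [PySem.Dict.getD_foldl_modify_append, PySem.Dict.getD_empty, pvGroup_eq]
  simp
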